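-- pv_equiv track=rewrite | github.com/ABI-CTT-Group/VeriFlow | backend/prompt_engineering/fix_prompts.py | fix_prompt_text
-- ===== SOURCE A (Python) =====
-- ALLOWED_PLACEHOLDERS = [
--     "isa_json",
--     "repo_context",
--     "previous_errors",
--     "generated_code",
--     "validation_errors"
-- ]
--
-- def fix_prompt_text(text):
--     if not isinstance(text, str):
--         return text
--
--     # Step 1: Escape EVERYTHING.
--     # { -> {{ and } -> }}
--     # This protects the JSON examples.
--     fixed = text.replace("{", "{{").replace("}", "}}")
--
--     # Step 2: Un-escape the valid placeholders.
--     # We turn {{isa_json}} back into {isa_json}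
--     for var in ALLOWED_PLACEHOLDERS:
--         # We look for the double-escaped version
--         pattern = f"{{{{{var}}}}}"
--         replacement = f"{{{var}}}"
--         fixed = fixed.replace(pattern, replacement)
--
--     return fixed
-- ===== SOURCE B (Python) =====
-- ALLOWED_PLACEHOLDERS = [
--     "isa_json",
--     "repo_context",
--     "previous_errors",
--     "generated_code",
--     "validation_errors"
-- ]
--
-- def fix_prompt_text(text):
--     if not isinstance(text, str):
--         return text
--     # Single left-to-right pass: keep an allowed placeholder verbatim,
--     # double any other brace, copy everything else.
--     out = []
--     i = 0
--     n = len(text)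
--     while i < n:
--         c = text[i]
--         if c == "{":
--             for var in ALLOWED_PLACEHOLDERS:
--                 ph = "{" + var + "}"
--                 if text.startswith(ph, i):
--                     out.append(ph)
--                     i += len(ph)
--                     break
--             else:
--                 out.append("{{")
--                 i += 1
--         elif c == "}":
--             out.append("}}")
--             i += 1
--         else:
--             out.append(c)
--             i += 1
--     return "".join(out)
-- ===== Notes on version B (the rewrite author's own statement) =====
-- stated objective: alternative
-- what changed: Replaced the escape-everything-then-unescape-each-placeholder strategy (7 full replace passes over the string) by a single left-to-right scan that matches an allowed placeholder, doubles a bare brace, or copies the character.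
import Mathlib
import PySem

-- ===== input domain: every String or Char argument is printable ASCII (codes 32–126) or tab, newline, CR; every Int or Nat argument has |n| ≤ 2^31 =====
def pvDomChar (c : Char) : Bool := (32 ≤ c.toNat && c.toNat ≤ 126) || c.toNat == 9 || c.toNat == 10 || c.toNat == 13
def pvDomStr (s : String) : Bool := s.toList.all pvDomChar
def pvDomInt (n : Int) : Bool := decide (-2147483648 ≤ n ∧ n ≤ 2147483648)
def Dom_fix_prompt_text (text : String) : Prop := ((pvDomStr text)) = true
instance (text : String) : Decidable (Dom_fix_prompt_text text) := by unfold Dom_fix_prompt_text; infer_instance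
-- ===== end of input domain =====

-- B replaces A's escape-everything-then-unescape-placeholders strategy (7 replace passes)
-- by one left-to-right scan; same return value (the isinstance guard is vacuous for String).

-- ALLOWED_PLACEHOLDERS, as lists of characters
def pvAllowed : List (List Char) :=
  [ "isa_json".toList, "repo_context".toList, "previous_errors".toList,
    "generated_code".toList, "validation_errors".toList ]

-- ===== PORT A =====
-- step for step: fixed = text.replace("{","{{").replace("}","}}"); then for each var,
-- fixed = fixed.replace("{{"+var+"}}", "{"+var+"}")
def pvFixA (s : List Char) : List Char :=
  let fixed := PySem.Chars.replace (PySem.Chars.replace s ['{'] ['{', '{']) ['}'] ['}', '}']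
  pvAllowed.foldl
    (fun fixed var =>
      PySem.Chars.replace fixed ('{' :: '{' :: var ++ ['}', '}']) ('{' :: var ++ ['}']))
    fixed

def fix_prompt_text (text : String) : String := String.ofList (pvFixA text.toList)

-- ===== PORT B =====
-- the inner `for var in ALLOWED_PLACEHOLDERS: if text.startswith("{"+var+"}", i)` loop
def pvFindPh (S : List (List Char)) (s : List Char) : Option (List Char) :=
  S.find? (fun v => ('{' :: v ++ ['}']).isPrefixOf s)

-- the single left-to-right scan of Source B (S is the placeholder list)
def pvScan (S : List (List Char)) : List Char → List Char
  | [] => []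
  | c :: cs =>
    if c = '{' then
      match pvFindPh S (c :: cs) with
      | some v => ('{' :: v ++ ['}']) ++ pvScan S (cs.drop (v.length + 1))
      | none => '{' :: '{' :: pvScan S cs
    else if c = '}' then '}' :: '}' :: pvScan S cs
    else c :: pvScan S cs
termination_by l => l.length
decreasing_by all_goals simp [List.length_drop]

def fix_prompt_text_alt (text : String) : String :=
  String.ofList (pvScan pvAllowed text.toList)

-- ===== PRECONDITION & SPEC =====
def Spec_fix_prompt_text (text : String) (out : String) : Prop := out = fix_prompt_text_alt text
instance (text : String) (out : String) : Decidable (Spec_fix_prompt_text text out) := by unfold Spec_fix_prompt_text; infer_instance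

-- ===== CLAIM (what is proved, stated in full; the proofs are below) =====
def Claim_equal_fix_prompt_text : Prop := ∀ (text : String), Dom_fix_prompt_text text → Spec_fix_prompt_text text (fix_prompt_text text)

-- ===== LEMMAS AND PROOFS =====

-- clean recursive form of PySem.Chars.replace for a nonempty pattern o :: os
def pvRep (o : Char) (os new : List Char) : List Char → List Char
  | [] => []
  | c :: t =>
    if (o :: os).isPrefixOf (c :: t) then new ++ pvRep o os new (t.drop os.length)
    else c :: pvRep o os new t
termination_by l => l.length
decreasing_by all_goals simp [List.length_drop]

theorem pvGo_eq_pvRep (o : Char) (os new : List Char) :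
    ∀ (fuel : Nat) (l acc : List Char), l.length ≤ fuel →
      PySem.Chars.replace.go (o :: os) new fuel l acc = acc.reverse ++ pvRep o os new l := by
  intro fuel
  induction fuel using Nat.strong_induction_on with
  | _ fuel ih =>
    intro l acc hle
    match fuel, l with
    | 0, [] => simp [PySem.Chars.replace.go, pvRep]
    | 0, c :: t => simp at hle
    | f + 1, [] => simp [PySem.Chars.replace.go, pvRep]
    | f + 1, c :: t =>
      rw [pvRep]
      simp only [PySem.Chars.replace.go]
      by_cases h : (o :: os).isPrefixOf (c :: t)
      · simp only [h, if_true]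
        have hle' : t.length + 1 ≤ f + 1 := by simpa using hle
        rw [ih f (by omega) _ _ (by simp only [List.length_drop, List.length_cons]; omega)]
        simp [List.drop_succ_cons]
      · simp only [h]
        rw [ih f (by omega) t (c :: acc) (by simp at hle ⊢; omega)]
        simp

theorem pvReplace_eq_pvRep (o : Char) (os new l : List Char) :
    PySem.Chars.replace l (o :: os) new = pvRep o os new l := by
  rw [PySem.Chars.replace]
  simp [pvGo_eq_pvRep o os new l.length l [] (le_refl _)]

-- character-wise brace doubling = the two single-character replace passes of A's step 1
def pvDub : List Char → List Char
  | [] => []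
  | c :: t => (if c = '{' then ['{', '{'] else if c = '}' then ['}', '}'] else [c]) ++ pvDub t

theorem pvStep1_eq_pvDub (s : List Char) :
    pvRep '}' [] ['}', '}'] (pvRep '{' [] ['{', '{'] s) = pvDub s := by
  induction s with
  | nil => simp [pvRep, pvDub]
  | cons c t ih =>
    by_cases h1 : c = '{'
    · subst h1; simp [pvRep, pvDub, List.isPrefixOf, ih]
    · by_cases h2 : c = '}'
      · subst h2; simp [pvRep, pvDub, List.isPrefixOf, ih]
      · have h1' : ¬ ('{' = c) := fun h => h1 h.symm
        have h2' : ¬ ('}' = c) := fun h => h2 h.symm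
        simp [pvRep, pvDub, List.isPrefixOf, h1, h2, h1', h2', ih]

def pvOkName (v : List Char) : Prop := v ≠ [] ∧ ∀ c ∈ v, c ≠ '{' ∧ c ≠ '}'

-- the scan with no allowed placeholders is plain brace doubling
theorem pvScan_nil (s : List Char) : pvScan [] s = pvDub s := by
  induction s with
  | nil => simp [pvScan, pvDub]
  | cons c t ih =>
    by_cases h1 : c = '{'
    · subst h1; simp [pvScan, pvFindPh, pvDub, ih]
    · by_cases h2 : c = '}'
      · subst h2; simp [pvScan, pvDub, ih]
      · simp [pvScan, pvDub, h1, h2, ih]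

theorem pvRep_cons_neg {o : Char} {os : List Char} {c : Char} {t : List Char} (new : List Char)
    (h : (o :: os).isPrefixOf (c :: t) = false) :
    pvRep o os new (c :: t) = c :: pvRep o os new t := by
  rw [pvRep]; simp [h]

theorem pvRep_cons_pos {o : Char} {os : List Char} {c : Char} {t : List Char} (new : List Char)
    (h : (o :: os).isPrefixOf (c :: t) = true) :
    pvRep o os new (c :: t) = new ++ pvRep o os new (t.drop os.length) := by
  rw [pvRep]; simp [h]

theorem pvScan_lbrace_some {S : List (List Char)} {cs u : List Char}
    (hf : pvFindPh S ('{' :: cs) = some u) :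
    pvScan S ('{' :: cs) = ('{' :: u ++ ['}']) ++ pvScan S (cs.drop (u.length + 1)) := by
  rw [pvScan]; simp [hf]

theorem pvScan_lbrace_none {S : List (List Char)} {cs : List Char}
    (hf : pvFindPh S ('{' :: cs) = none) :
    pvScan S ('{' :: cs) = '{' :: '{' :: pvScan S cs := by
  rw [pvScan]; simp [hf]

theorem pvScan_rbrace (S : List (List Char)) (cs : List Char) :
    pvScan S ('}' :: cs) = '}' :: '}' :: pvScan S cs := by
  rw [pvScan]; simp

theorem pvScan_other {c : Char} (S : List (List Char)) (cs : List Char)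
    (h1 : c ≠ '{') (h2 : c ≠ '}') :
    pvScan S (c :: cs) = c :: pvScan S cs := by
  rw [pvScan]; simp [h1, h2]

-- pvRep with pattern starting '{' passes over any '{'-free block
theorem pvRep_no_lbrace (os new : List Char) (b : List Char) (hb : ∀ c ∈ b, c ≠ '{') :
    ∀ X, pvRep '{' os new (b ++ X) = b ++ pvRep '{' os new X := by
  induction b with
  | nil => simp
  | cons a b' ih =>
    intro X
    have ha : a ≠ '{' := (hb a (by simp))
    have ha' : ¬ ('{' = a) := fun h => ha h.symm
    rw [List.cons_append, pvRep_cons_neg new (by simp [List.isPrefixOf, ha'])]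
    rw [ih (fun c hc => hb c (by simp [hc]))]
    simp

-- pvRep with pattern '{','{',… passes over a rendered placeholder block
theorem pvRep_block (w new : List Char) (u : List Char) (hu : pvOkName u) :
    ∀ X, pvRep '{' ('{' :: w) new (('{' :: u ++ ['}']) ++ X) =
      ('{' :: u ++ ['}']) ++ pvRep '{' ('{' :: w) new X := by
  obtain ⟨hne, hbf⟩ := hu
  obtain ⟨d, u', rfl⟩ : ∃ d u', u = d :: u' := by
    cases u with
    | nil => exact absurd rfl hne
    | cons d u' => exact ⟨d, u', rfl⟩
  intro X
  have hd' : ¬ ('{' = d) := fun h => (hbf d (by simp)).1 h.symm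
  have hb : ∀ c ∈ (d :: u') ++ ['}'], c ≠ '{' := by
    intro c hc
    rcases List.mem_append.1 hc with h | h
    · exact (hbf c h).1
    · simp at h; subst h; decide
  simp only [List.cons_append, List.append_assoc, List.nil_append]
  rw [pvRep_cons_neg new (by simp [List.isPrefixOf, hd'])]
  rw [show d :: (u' ++ '}' :: X) = ((d :: u') ++ ['}']) ++ X by simp]
  rw [pvRep_no_lbrace ('{' :: w) new _ hb X]
  simp

-- the scan copies a brace-free block verbatim
theorem pvScan_letters (S : List (List Char)) (u : List Char) (hu : ∀ c ∈ u, c ≠ '{' ∧ c ≠ '}') :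
    ∀ rest, pvScan S (u ++ rest) = u ++ pvScan S rest := by
  induction u with
  | nil => simp
  | cons a u' ih =>
    intro rest
    have h1 := (hu a (by simp)).1
    have h2 := (hu a (by simp)).2
    rw [List.cons_append, pvScan]
    simp [h1, h2, ih (fun c hc => hu c (by simp [hc])) rest]

-- prefix transfer: "v}}" is a prefix of the scanned string iff "v}" is a prefix of the source
theorem pvPrefix_scan (S : List (List Char)) (u : List Char) (hu : ∀ c ∈ u, c ≠ '{' ∧ c ≠ '}') :
    ∀ x, (u ++ ['}', '}']) <+: pvScan S x ↔ (u ++ ['}']) <+: x := by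
  induction u with
  | nil =>
    intro x
    cases x with
    | nil => simp [pvScan]
    | cons c cs =>
      by_cases hc : c = '{'
      · subst hc
        cases hf : pvFindPh S ('{' :: cs) with
        | some v => simp [pvScan_lbrace_some hf, List.cons_prefix_cons]
        | none => simp [pvScan_lbrace_none hf, List.cons_prefix_cons]
      · by_cases hc2 : c = '}'
        · subst hc2; simp [pvScan_rbrace, List.cons_prefix_cons]
        · simp [pvScan_other S cs hc hc2, List.cons_prefix_cons, Ne.symm hc2]
  | cons a u' ih =>
    intro x
    have ha1 : a ≠ '{' := (hu a (by simp)).1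
    have ha2 : a ≠ '}' := (hu a (by simp)).2
    have ih' := ih (fun c hc => hu c (by simp [hc]))
    cases x with
    | nil => simp [pvScan]
    | cons c cs =>
      by_cases hc : c = '{'
      · subst hc
        cases hf : pvFindPh S ('{' :: cs) with
        | some v => simp [pvScan_lbrace_some hf, List.cons_prefix_cons, ha1]
        | none => simp [pvScan_lbrace_none hf, List.cons_prefix_cons, ha1]
      · by_cases hc2 : c = '}'
        · subst hc2; simp [pvScan_rbrace, List.cons_prefix_cons, ha2]
        · simp [pvScan_other S cs hc hc2, List.cons_prefix_cons, ih' cs]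

theorem pvNoCrossPrefix {u v : List Char} (h1 : ¬ u <+: v) (h2 : ¬ v <+: u)
    (a b : List Char) : ¬ (v ++ a) <+: (u ++ b) := by
  intro h
  have hvu : v <+: u ++ b := ((List.prefix_append v a).trans h)
  have huu : u <+: u ++ b := List.prefix_append u b
  rcases List.prefix_or_prefix_of_prefix hvu huu with hpq | hpq
  · exact h2 hpq
  · exact h1 hpq

-- the full escaped pattern "{{v}}" never occurs at the start of a scanned string
theorem pvNotDeep (S : List (List Char)) (v : List Char)
    (_hS : ∀ u ∈ S, pvOkName u) (hv : pvOkName v)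
    (hpre : ∀ u ∈ S, ¬ u <+: v ∧ ¬ v <+: u) :
    ∀ cs, ¬ ('{' :: (v ++ ['}', '}'])) <+: pvScan S cs := by
  obtain ⟨hne, hbf⟩ := hv
  obtain ⟨e, v', rfl⟩ : ∃ e v', v = e :: v' := by
    cases v with
    | nil => exact absurd rfl hne
    | cons e v' => exact ⟨e, v', rfl⟩
  have he : e ≠ '{' := (hbf e (by simp)).1
  intro cs
  cases cs with
  | nil => simp [pvScan]
  | cons d ds =>
    by_cases hd : d = '{'
    · subst hd
      cases hf : pvFindPh S ('{' :: ds) with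
      | some u =>
        have hu : u ∈ S := List.mem_of_find?_eq_some hf
        rw [pvScan_lbrace_some hf]
        intro h
        have h2 : ((e :: v') ++ ['}', '}']) <+: u ++ (['}'] ++ pvScan S (ds.drop (u.length + 1))) := by
          simpa using h
        exact pvNoCrossPrefix (hpre u hu).1 (hpre u hu).2 _ _ h2
      | none =>
        rw [pvScan_lbrace_none hf]
        simp [List.cons_prefix_cons, he]
    · by_cases hd2 : d = '}'
      · subst hd2; rw [pvScan_rbrace]; simp [List.cons_prefix_cons]
      · rw [pvScan_other S ds hd hd2]; simp [List.cons_prefix_cons, Ne.symm hd]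


-- MAIN: one replace pass of A turns the S-scan into the (S ++ [v])-scan
theorem pvMain (S : List (List Char)) (v : List Char)
    (hS : ∀ u ∈ S, pvOkName u) (hv : pvOkName v)
    (hpre : ∀ u ∈ S, ¬ u <+: v ∧ ¬ v <+: u) :
    ∀ s, pvRep '{' ('{' :: (v ++ ['}', '}'])) ('{' :: v ++ ['}']) (pvScan S s)
        = pvScan (S ++ [v]) s := by
  suffices H : ∀ n s, s.length ≤ n →
      pvRep '{' ('{' :: (v ++ ['}', '}'])) ('{' :: v ++ ['}']) (pvScan S s)
        = pvScan (S ++ [v]) s from fun s => H s.length s le_rfl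
  intro n
  induction n with
  | zero =>
    intro s hs
    have : s = [] := List.eq_nil_of_length_eq_zero (Nat.le_zero.1 hs)
    subst this; simp [pvScan, pvRep]
  | succ n ih =>
    intro s hs
    cases s with
    | nil => simp [pvScan, pvRep]
    | cons c cs =>
      have hcs : cs.length ≤ n := by simpa using hs
      by_cases hc : c = '{'
      · subst hc
        cases hf : pvFindPh S ('{' :: cs) with
        | some u =>
          have hu : u ∈ S := List.mem_of_find?_eq_some hf
          have hfv : pvFindPh (S ++ [v]) ('{' :: cs) = some u := by
            unfold pvFindPh at hf ⊢; rw [List.find?_append, hf]; rfl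
          rw [pvScan_lbrace_some hf, pvScan_lbrace_some hfv]
          rw [pvRep_block _ _ u (hS u hu)]
          rw [ih (cs.drop (u.length + 1)) (le_trans (by simp) hcs)]
        | none =>
          by_cases hm : (v ++ ['}']) <+: cs
          · have hfv : pvFindPh (S ++ [v]) ('{' :: cs) = some v := by
              unfold pvFindPh at hf ⊢
              rw [List.find?_append, hf]
              simp [List.isPrefixOf_iff_prefix, hm]
            obtain ⟨t₂, rfl⟩ := hm
            have hdrop : ((v ++ ['}']) ++ t₂).drop (v.length + 1) = t₂ := by
              rw [show v.length + 1 = (v ++ ['}']).length by simp]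
              exact List.drop_left
            rw [pvScan_lbrace_none hf, pvScan_lbrace_some hfv, hdrop]
            rw [show (v ++ ['}']) ++ t₂ = v ++ ('}' :: t₂) by simp]
            rw [pvScan_letters S v hv.2 ('}' :: t₂)]
            rw [pvScan_rbrace]
            rw [pvRep_cons_pos _ (by
              rw [List.isPrefixOf_iff_prefix, List.cons_prefix_cons]
              refine ⟨rfl, ?_⟩
              rw [show '{' :: (v ++ '}' :: '}' :: pvScan S t₂) = ('{' :: (v ++ ['}', '}'])) ++ pvScan S t₂ by simp]
              exact List.prefix_append _ _)]
            rw [show '{' :: (v ++ '}' :: '}' :: pvScan S t₂) = ('{' :: (v ++ ['}', '}'])) ++ pvScan S t₂ by simp]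
            rw [List.drop_left]
            have ht₂ : t₂.length ≤ n := by simp at hcs; omega
            rw [ih t₂ ht₂]
          · have hfv : pvFindPh (S ++ [v]) ('{' :: cs) = none := by
              unfold pvFindPh at hf ⊢
              rw [List.find?_append, hf]
              simp [List.isPrefixOf_iff_prefix, hm]
            rw [pvScan_lbrace_none hf, pvScan_lbrace_none hfv]
            rw [pvRep_cons_neg _ (by
              rw [Bool.eq_false_iff]
              intro hpre'
              have h3 : v ++ ['}'] <+: cs :=
                (pvPrefix_scan S v hv.2 cs).1 (by simpa using hpre')
              exact hm h3)]
            rw [pvRep_cons_neg _ (by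
              rw [Bool.eq_false_iff]
              intro hpre'
              exact pvNotDeep S v hS hv hpre cs (by simpa using hpre'))]
            rw [ih cs hcs]
      · by_cases hc2 : c = '}'
        · subst hc2
          rw [pvScan_rbrace, pvScan_rbrace]
          rw [pvRep_cons_neg _ (by simp [List.isPrefixOf])]
          rw [pvRep_cons_neg _ (by simp [List.isPrefixOf])]
          rw [ih cs hcs]
        · rw [pvScan_other S cs hc hc2, pvScan_other (S ++ [v]) cs hc hc2]
          rw [pvRep_cons_neg _ (by simp [List.isPrefixOf, Ne.symm hc])]
          rw [ih cs hcs]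

def pvGood (L : List (List Char)) : Prop :=
  (∀ u ∈ L, pvOkName u) ∧ L.Pairwise (fun a b => ¬ a <+: b ∧ ¬ b <+: a)

theorem pvChain (rest : List (List Char)) :
    ∀ S s, pvGood (S ++ rest) →
      rest.foldl
        (fun fixed var =>
          PySem.Chars.replace fixed ('{' :: '{' :: var ++ ['}', '}']) ('{' :: var ++ ['}']))
        (pvScan S s)
      = pvScan (S ++ rest) s := by
  induction rest with
  | nil => intro S s _; simp
  | cons v rest' ih =>
    intro S s hg
    have hS : ∀ u ∈ S, pvOkName u := fun u hu => hg.1 u (List.mem_append_left _ hu)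
    have hv : pvOkName v := hg.1 v (by simp)
    have hpre : ∀ u ∈ S, ¬ u <+: v ∧ ¬ v <+: u := by
      intro u hu
      exact ((List.pairwise_append.1 hg.2).2.2 u hu v (by simp))
    rw [List.foldl_cons]
    rw [show PySem.Chars.replace (pvScan S s) ('{' :: '{' :: v ++ ['}', '}']) ('{' :: v ++ ['}'])
        = pvRep '{' ('{' :: (v ++ ['}', '}'])) ('{' :: v ++ ['}']) (pvScan S s) from
      pvReplace_eq_pvRep '{' ('{' :: (v ++ ['}', '}'])) ('{' :: v ++ ['}']) (pvScan S s)]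
    rw [pvMain S v hS hv hpre s]
    rw [ih (S ++ [v]) s (by simpa using hg)]
    simp

theorem pvFixA_eq_scan (s : List Char) : pvFixA s = pvScan pvAllowed s := by
  unfold pvFixA
  rw [pvReplace_eq_pvRep '{' [] ['{', '{'] s]
  rw [pvReplace_eq_pvRep '}' [] ['}', '}'] _]
  rw [pvStep1_eq_pvDub s, ← pvScan_nil s]
  have hgood : pvGood ([] ++ pvAllowed) := by
    unfold pvGood
    constructor
    · unfold pvOkName pvAllowed; simp
    · unfold pvAllowed; simp [List.pairwise_cons]
  have := pvChain pvAllowed [] s hgood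
  simpa using this

-- ===== VERDICT (by name: the statement is the Claim_ definition above) =====
theorem fix_prompt_text_spec : Claim_equal_fix_prompt_text := by
  intro text _
  unfold Spec_fix_prompt_text fix_prompt_text fix_prompt_text_alt
  rw [pvFixA_eq_scan]
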